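-- pv_equiv track=rewrite | github.com/mattgenovese1/natasha | ai_engine.py | _optimize_script
-- ===== SOURCE A (Python) =====
-- from typing import Dict, List, Tuple, Optional, Union, Any
--
-- def _optimize_script(script: str, merge_strings: bool = False) -> str:
--     """Optimize the generated script for better performance.
--
--     Args:
--         script: Generated script
--         merge_strings: If True, merge consecutive STRING commands
--
--     Returns:
--         Optimized script
--     """
--     lines = script.split("\n")
--     optimized_lines: List[str] = []
--
--     # Process lines
--     i = 0
--     while i < len(lines):
--         current_line = lines[i].strip()
--
--         # Skip empty lines
--         if not current_line:
--             i += 1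
--             continue
--
--         # Combine consecutive STRING commands (optional)
--         if merge_strings and current_line.startswith("STRING ") and i + 1 < len(lines):
--             next_line = lines[i + 1].strip()
--             if next_line.startswith("STRING "):
--                 current_text = current_line[7:]
--                 next_text = next_line[7:]
--                 combined_line = f"STRING {current_text} {next_text}"
--                 lines[i + 1] = combined_line
--                 i += 1
--                 continue
--
--         # Optimize DELAY commands
--         if current_line.startswith("DELAY "):
--             try:
--                 delay_value = int(current_line[6:])
--                 # Minimum delay of 20ms
--                 if delay_value < 20:
--                     optimized_lines.append("DELAY 20")
--                 else:
--                     optimized_lines.append(current_line)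
--             except ValueError:
--                 optimized_lines.append(current_line)
--         else:
--             optimized_lines.append(current_line)
--
--         i += 1
--
--     return "\n".join(optimized_lines)
-- ===== SOURCE B (Python) =====
-- def _optimize_script(script: str, merge_strings: bool = False) -> str:
--     """Single pass with a pending accumulated STRING text instead of
--     index-driven merging that mutates the line list."""
--     optimized = []
--     pending = None  # accumulated text of a run of consecutive STRING lines
--
--     def flush():
--         nonlocal pending
--         if pending is not None:
--             optimized.append("STRING " + pending)
--             pending = None
--
--     for raw in script.split("\n"):
--         line = raw.strip()
--         if not line:
--             flush()
--             continue
--         if merge_strings and line.startswith("STRING "):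
--             text = line[7:]
--             pending = text if pending is None else pending + " " + text
--             continue
--         flush()
--         if line.startswith("DELAY "):
--             try:
--                 if int(line[6:]) < 20:
--                     optimized.append("DELAY 20")
--                 else:
--                     optimized.append(line)
--             except ValueError:
--                 optimized.append(line)
--         else:
--             optimized.append(line)
--     flush()
--     return "\n".join(optimized)
-- ===== Notes on version B (the rewrite author's own statement) =====
-- stated objective: simpler
-- what changed: Replaces the index-driven while loop that merges consecutive STRING lines by mutating lines[i+1] and re-stripping/re-scanning it with a single for-loop over the split lines that carries a pending accumulated STRING text, flushed on blank, non-STRING and end-of-input boundaries.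
import Mathlib
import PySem

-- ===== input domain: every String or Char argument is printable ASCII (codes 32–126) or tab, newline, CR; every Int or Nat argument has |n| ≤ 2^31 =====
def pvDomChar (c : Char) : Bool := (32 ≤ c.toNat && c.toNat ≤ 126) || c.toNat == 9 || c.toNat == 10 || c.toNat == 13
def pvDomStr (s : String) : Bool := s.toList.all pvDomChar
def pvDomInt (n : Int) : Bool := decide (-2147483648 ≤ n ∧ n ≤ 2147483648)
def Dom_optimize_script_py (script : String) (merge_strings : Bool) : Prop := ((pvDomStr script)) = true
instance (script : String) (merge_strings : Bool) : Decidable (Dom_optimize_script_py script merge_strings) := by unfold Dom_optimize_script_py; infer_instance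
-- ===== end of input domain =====

-- B replaces A's index-driven while loop (which merges consecutive STRING lines by
-- mutating lines[i+1] and skipping) with a single for-loop carrying a pending
-- accumulated STRING text; objective: simpler.

-- ===== PORT A =====
-- DELAY-clamp step of A (the try/except int(...) block), shared shape with A's code
def pvDelayA (cur : List Char) : List Char :=
  if PySem.Chars.startswith cur "DELAY ".toList then
    match PySem.Int.ofChars? (PySem.Chars.slice cur (some 6) none) with
    | some d => if d < 20 then "DELAY 20".toList else cur
    | none => cur
  else cur

-- the while loop of A: lines still to process (with in-place mutation of lines[i+1]
-- modelled as replacing the head of the remainder), accumulator optimized_lines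
def pvALoop (m : Bool) (lines acc : List (List Char)) : List (List Char) :=
  match lines with
  | [] => acc
  | l :: rest =>
    let cur := PySem.Chars.strip l
    if cur = [] then pvALoop m rest acc
    else
      match hr : rest with
      | next0 :: rest' =>
        if m && PySem.Chars.startswith cur "STRING ".toList then
          if PySem.Chars.startswith (PySem.Chars.strip next0) "STRING ".toList then
            pvALoop m (("STRING ".toList ++ PySem.Chars.slice cur (some 7) none ++ " ".toList
                        ++ PySem.Chars.slice (PySem.Chars.strip next0) (some 7) none) :: rest') acc
          else pvALoop m rest (acc ++ [pvDelayA cur])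
        else pvALoop m rest (acc ++ [pvDelayA cur])
      | [] => pvALoop m [] (acc ++ [pvDelayA cur])
  termination_by lines.length
  decreasing_by all_goals (subst_vars; simp)

def optimize_script_py (script : String) (merge_strings : Bool) : String :=
  String.ofList (PySem.Chars.join "\n".toList
    (pvALoop merge_strings (PySem.Chars.splitOn script.toList "\n".toList) []))

-- ===== PORT B =====
-- Source B's flush(): append the pending accumulated STRING text, if any
def pvFlush (acc : List (List Char)) (pending : Option (List Char)) : List (List Char) :=
  match pending with
  | none => acc
  | some p => acc ++ ["STRING ".toList ++ p]

-- DELAY-clamp step of B (Source B's try/except int(...) block)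
def pvDelayB (line : List Char) : List Char :=
  if PySem.Chars.startswith line "DELAY ".toList then
    match PySem.Int.ofChars? (PySem.Chars.slice line (some 6) none) with
    | some d => if d < 20 then "DELAY 20".toList else line
    | none => line
  else line

-- Source B's single for-loop with the pending accumulator
def pvBLoop (m : Bool) (lines : List (List Char)) (acc : List (List Char))
    (pending : Option (List Char)) : List (List Char) :=
  match lines with
  | [] => pvFlush acc pending
  | raw :: rest =>
    let line := PySem.Chars.strip raw
    if line = [] then pvBLoop m rest (pvFlush acc pending) none
    else if m && PySem.Chars.startswith line "STRING ".toList then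
      let text := PySem.Chars.slice line (some 7) none
      pvBLoop m rest acc
        (some (match pending with | none => text | some p => p ++ " ".toList ++ text))
    else pvBLoop m rest (pvFlush acc pending ++ [pvDelayB line]) none

def optimize_script_py_alt (script : String) (merge_strings : Bool) : String :=
  String.ofList (PySem.Chars.join "\n".toList
    (pvBLoop merge_strings (PySem.Chars.splitOn script.toList "\n".toList) [] none))

-- ===== PRECONDITION & SPEC =====
def Spec_optimize_script_py (script : String) (merge_strings : Bool) (out : String) : Prop := out = optimize_script_py_alt script merge_strings
instance (script : String) (merge_strings : Bool) (out : String) : Decidable (Spec_optimize_script_py script merge_strings out) := by unfold Spec_optimize_script_py; infer_instance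

-- ===== CLAIM (what is proved, stated in full; the proofs are below) =====
def Claim_equal_optimize_script_py : Prop := ∀ (script : String) (merge_strings : Bool), Dom_optimize_script_py script merge_strings → Spec_optimize_script_py script merge_strings (optimize_script_py script merge_strings)

-- ===== LEMMAS AND PROOFS =====

-- the two DELAY helpers are the same function
theorem pvDelay_eq (cur : List Char) : pvDelayA cur = pvDelayB cur := rfl

-- a STRING line is not a DELAY line, so A's clamp leaves it unchanged
theorem pvDelayA_string (p : List Char) :
    pvDelayA ("STRING ".toList ++ p) = "STRING ".toList ++ p := by
  unfold pvDelayA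
  rw [if_neg]
  simp [PySem.Chars.startswith, List.isPrefixOf]

-- cur[7:] of "STRING " ++ p is p
theorem pvSliceSeven (p : List Char) :
    PySem.Chars.slice ("STRING ".toList ++ p) (some 7) none = p := by
  rw [PySem.Chars.slice_eq_listSlice, PySem.List.slice_from _ (by norm_num)]
  rw [show ((7:Int).toNat = ("STRING ".toList).length) by decide, List.drop_left]

theorem pvSW_string (p : List Char) :
    PySem.Chars.startswith ("STRING ".toList ++ p) "STRING ".toList = true := by
  rw [PySem.Chars.startswith_iff]; exact List.prefix_append _ _

theorem pvSW_exists (s : List Char) (h : PySem.Chars.startswith s "STRING ".toList = true) :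
    ∃ t, s = "STRING ".toList ++ t := by
  rw [PySem.Chars.startswith_iff] at h; obtain ⟨t, ht⟩ := h; exact ⟨t, ht.symm⟩

-- a list whose first and last chars are non-space is fixed by strip
theorem pvStripFix (cs : List Char) (h0 : cs ≠ [])
    (hh : ∀ c, cs.head? = some c → PySem.Chars.isspace c = false)
    (hl : ∀ c, cs.getLast? = some c → PySem.Chars.isspace c = false) :
    PySem.Chars.strip cs = cs := by
  have hh' := hh _ (List.head?_eq_some_head h0)
  have hl' := hl _ (List.getLast?_eq_some_getLast h0)
  have hls : PySem.Chars.lstrip cs = cs := by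
    obtain ⟨c, t, rfl⟩ := List.exists_cons_of_ne_nil h0
    simp only [List.head_cons] at hh'
    simp [PySem.Chars.lstrip, hh']
  have hrs : PySem.Chars.rstrip cs = cs := by
    unfold PySem.Chars.rstrip
    rw [← List.dropLast_append_getLast h0, List.reverse_append]
    simp [hl']
  simp [PySem.Chars.strip, hls, hrs]

-- the last char of a nonempty stripped string is non-space
theorem pvStripLast (s : List Char) (h : PySem.Chars.strip s ≠ []) :
    PySem.Chars.isspace ((PySem.Chars.strip s).getLast h) = false := by
  unfold PySem.Chars.strip PySem.Chars.rstrip at *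
  rw [List.getLast_reverse]
  exact List.head_dropWhile_not _ _

theorem pvStripLast? (s : List Char) (c : Char)
    (h : (PySem.Chars.strip s).getLast? = some c) : PySem.Chars.isspace c = false := by
  have hne : PySem.Chars.strip s ≠ [] := by intro h0; rw [h0] at h; simp at h
  have h2 := List.getLast?_eq_some_getLast hne
  rw [h] at h2
  rw [Option.some.injEq] at h2
  rw [h2]
  exact pvStripLast s hne

-- the text after "STRING " in a stripped line is nonempty
theorem pvTail_ne_nil (l u : List Char)
    (hl : PySem.Chars.strip l = "STRING ".toList ++ u) : u ≠ [] := by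
  intro h0
  subst h0
  have h : (PySem.Chars.strip l).getLast? = some ' ' := by rw [hl]; decide
  have := pvStripLast? l ' ' h
  exact absurd this (by decide)

-- the last char of that text is non-space
theorem pvLastU (l u : List Char) (hu : u ≠ [])
    (hl : PySem.Chars.strip l = "STRING ".toList ++ u) :
    ∀ c, u.getLast? = some c → PySem.Chars.isspace c = false := by
  intro c hc
  apply pvStripLast? l c
  rw [hl, List.getLast?_append_of_ne_nil _ hu]
  exact hc

-- a merged STRING line is fixed by strip
theorem pvInvCombined (p u : List Char) (hu : u ≠ [])
    (hlast : ∀ c, u.getLast? = some c → PySem.Chars.isspace c = false) :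
    PySem.Chars.strip ("STRING ".toList ++ p ++ " ".toList ++ u)
      = "STRING ".toList ++ p ++ " ".toList ++ u := by
  apply pvStripFix _ (by simp)
  · intro c hc
    have h' : some 'S' = some c := hc
    rw [Option.some.injEq] at h'
    rw [← h']; decide
  · intro c hc
    rw [List.getLast?_append_of_ne_nil _ hu] at hc
    exact hlast c hc

-- unfolding lemmas for A's loop
theorem pvALoop_nil (m : Bool) (acc : List (List Char)) : pvALoop m [] acc = acc := by
  rw [pvALoop]

theorem pvALoop_blank (m : Bool) (l : List Char) (rest acc : List (List Char))
    (h : PySem.Chars.strip l = []) : pvALoop m (l :: rest) acc = pvALoop m rest acc := by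
  rw [pvALoop.eq_def]; simp [h]

theorem pvALoop_single (m : Bool) (l : List Char) (acc : List (List Char))
    (h : PySem.Chars.strip l ≠ []) :
    pvALoop m [l] acc = acc ++ [pvDelayA (PySem.Chars.strip l)] := by
  rw [pvALoop.eq_def]; simp [h, pvALoop_nil]

theorem pvALoop_nomerge (m : Bool) (l : List Char) (rest acc : List (List Char))
    (h : PySem.Chars.strip l ≠ [])
    (hg : (m && PySem.Chars.startswith (PySem.Chars.strip l) "STRING ".toList) = false) :
    pvALoop m (l :: rest) acc = pvALoop m rest (acc ++ [pvDelayA (PySem.Chars.strip l)]) := by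
  cases rest with
  | nil => rw [pvALoop_single m l acc h, pvALoop_nil]
  | cons n0 rs => rw [pvALoop.eq_def]; simp [h]; simp_all

theorem pvALoop_mergeno (m : Bool) (l n0 : List Char) (rs acc : List (List Char))
    (h : PySem.Chars.strip l ≠ [])
    (hg : (m && PySem.Chars.startswith (PySem.Chars.strip l) "STRING ".toList) = true)
    (hn : PySem.Chars.startswith (PySem.Chars.strip n0) "STRING ".toList = false) :
    pvALoop m (l :: n0 :: rs) acc = pvALoop m (n0 :: rs) (acc ++ [pvDelayA (PySem.Chars.strip l)]) := by
  rw [pvALoop.eq_def]; simp [h]; simp_all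

theorem pvALoop_merge (m : Bool) (l n0 : List Char) (rs acc : List (List Char))
    (h : PySem.Chars.strip l ≠ [])
    (hg : (m && PySem.Chars.startswith (PySem.Chars.strip l) "STRING ".toList) = true)
    (hn : PySem.Chars.startswith (PySem.Chars.strip n0) "STRING ".toList = true) :
    pvALoop m (l :: n0 :: rs) acc
      = pvALoop m (("STRING ".toList ++ PySem.Chars.slice (PySem.Chars.strip l) (some 7) none
          ++ " ".toList ++ PySem.Chars.slice (PySem.Chars.strip n0) (some 7) none) :: rs) acc := by
  rw [pvALoop.eq_def]; simp [h]; simp_all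

-- unfolding lemmas for B's loop
theorem pvBLoop_nil (m : Bool) (acc : List (List Char)) (pending : Option (List Char)) :
    pvBLoop m [] acc pending = pvFlush acc pending := rfl

theorem pvBLoop_blank (m : Bool) (l : List Char) (rest acc : List (List Char))
    (pending : Option (List Char)) (h : PySem.Chars.strip l = []) :
    pvBLoop m (l :: rest) acc pending = pvBLoop m rest (pvFlush acc pending) none := by
  rw [pvBLoop]; simp [h]

theorem pvBLoop_string (m : Bool) (l : List Char) (rest acc : List (List Char))
    (pending : Option (List Char)) (h : PySem.Chars.strip l ≠ [])
    (hg : (m && PySem.Chars.startswith (PySem.Chars.strip l) "STRING ".toList) = true) :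
    pvBLoop m (l :: rest) acc pending
      = pvBLoop m rest acc (some (match pending with
          | none => PySem.Chars.slice (PySem.Chars.strip l) (some 7) none
          | some p => p ++ " ".toList ++ PySem.Chars.slice (PySem.Chars.strip l) (some 7) none)) := by
  rw [pvBLoop]; simp [h]; simp_all

theorem pvBLoop_other (m : Bool) (l : List Char) (rest acc : List (List Char))
    (pending : Option (List Char)) (h : PySem.Chars.strip l ≠ [])
    (hg : (m && PySem.Chars.startswith (PySem.Chars.strip l) "STRING ".toList) = false) :
    pvBLoop m (l :: rest) acc pending
      = pvBLoop m rest (pvFlush acc pending ++ [pvDelayB (PySem.Chars.strip l)]) none := by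
  rw [pvBLoop]; simp [h]; simp_all

theorem pvBase2 (m : Bool) (acc : List (List Char)) (x p : List Char)
    (hx : PySem.Chars.strip x = "STRING ".toList ++ p) :
    pvALoop m [x] acc = pvBLoop m [] acc (some p) := by
  rw [pvALoop_single m x acc (by rw [hx]; simp), hx, pvDelayA_string, pvBLoop_nil]
  rfl

-- main loop correspondence
theorem pvLoops (m : Bool) : ∀ n : Nat, ∀ lines : List (List Char), lines.length ≤ n →
    ∀ acc : List (List Char),
    (pvALoop m lines acc = pvBLoop m lines acc none)
    ∧ (∀ x p, PySem.Chars.strip x = "STRING ".toList ++ p → m = true →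
        pvALoop m (x :: lines) acc = pvBLoop m lines acc (some p)) := by
  intro n
  induction n with
  | zero =>
    intro lines hlen acc
    have h0 : lines = [] := List.length_eq_zero_iff.mp (Nat.le_zero.mp hlen)
    subst h0
    exact ⟨by rw [pvALoop_nil, pvBLoop_nil]; rfl,
           fun x p hx _ => pvBase2 m acc x p hx⟩
  | succ n ih =>
    intro lines hlen acc
    cases lines with
    | nil =>
      exact ⟨by rw [pvALoop_nil, pvBLoop_nil]; rfl,
             fun x p hx _ => pvBase2 m acc x p hx⟩
    | cons l rest =>
      have hr : rest.length ≤ n := by simp at hlen; omega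
      constructor
      · -- no pending STRING text
        by_cases hc : PySem.Chars.strip l = []
        · rw [pvALoop_blank m l rest acc hc, pvBLoop_blank m l rest acc none hc]
          exact (ih rest hr acc).1
        · by_cases hsw : (m && PySem.Chars.startswith (PySem.Chars.strip l) "STRING ".toList) = true
          · have hm : m = true := by revert hsw; cases m <;> simp
            have hsw' : PySem.Chars.startswith (PySem.Chars.strip l) "STRING ".toList = true := by
              revert hsw; cases PySem.Chars.startswith (PySem.Chars.strip l) "STRING ".toList <;> simp
            obtain ⟨t, ht⟩ := pvSW_exists _ hsw'
            rw [pvBLoop_string m l rest acc none hc hsw]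
            rw [show (match (none : Option (List Char)) with
                  | none => PySem.Chars.slice (PySem.Chars.strip l) (some 7) none
                  | some p => p ++ " ".toList ++ PySem.Chars.slice (PySem.Chars.strip l) (some 7) none)
                = PySem.Chars.slice (PySem.Chars.strip l) (some 7) none from rfl]
            rw [ht, pvSliceSeven]
            exact (ih rest hr acc).2 l t ht hm
          · rw [pvALoop_nomerge m l rest acc hc (by simpa using hsw),
                pvBLoop_other m l rest acc none hc (by simpa using hsw), pvDelay_eq]
            exact (ih rest hr _).1
      · -- pending text p; A's head line x strips to "STRING " ++ p
        intro x p hx hm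
        have hxne : PySem.Chars.strip x ≠ [] := by rw [hx]; simp
        have hgx : (m && PySem.Chars.startswith (PySem.Chars.strip x) "STRING ".toList) = true := by
          rw [hx, hm, pvSW_string]; rfl
        by_cases hc : PySem.Chars.strip l = []
        · have hn : PySem.Chars.startswith (PySem.Chars.strip l) "STRING ".toList = false := by
            rw [hc]; decide
          rw [pvALoop_mergeno m x l rest acc hxne hgx hn, hx, pvDelayA_string]
          rw [pvALoop_blank m l rest _ hc, pvBLoop_blank m l rest acc (some p) hc]
          exact (ih rest hr _).1
        · by_cases hsw2 : PySem.Chars.startswith (PySem.Chars.strip l) "STRING ".toList = true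
          · obtain ⟨u, hu⟩ := pvSW_exists _ hsw2
            have hune : u ≠ [] := pvTail_ne_nil l u hu
            rw [pvALoop_merge m x l rest acc hxne hgx hsw2, hx, pvSliceSeven, hu, pvSliceSeven]
            rw [pvBLoop_string m l rest acc (some p) hc (by rw [hm, hsw2]; rfl), hu, pvSliceSeven]
            have hcomb : PySem.Chars.strip ("STRING ".toList ++ (p ++ " ".toList ++ u))
                = "STRING ".toList ++ (p ++ " ".toList ++ u) := by
              rw [show "STRING ".toList ++ (p ++ " ".toList ++ u)
                    = "STRING ".toList ++ p ++ " ".toList ++ u by simp]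
              exact pvInvCombined p u hune (pvLastU l u hune hu)
            rw [show ("STRING ".toList ++ p ++ " ".toList ++ u)
                  = "STRING ".toList ++ (p ++ " ".toList ++ u) by simp]
            exact (ih rest hr acc).2 _ (p ++ " ".toList ++ u) hcomb hm
          · rw [pvALoop_mergeno m x l rest acc hxne hgx (by simpa using hsw2), hx, pvDelayA_string]
            rw [pvALoop_nomerge m l rest _ hc (by rw [Bool.eq_false_iff.mpr hsw2]; simp),
                pvBLoop_other m l rest acc (some p) hc (by rw [Bool.eq_false_iff.mpr hsw2]; simp), pvDelay_eq]
            exact (ih rest hr _).1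

-- ===== VERDICT (by name: the statement is the Claim_ definition above) =====
theorem optimize_script_py_spec : Claim_equal_optimize_script_py := by
  intro script m _
  unfold Spec_optimize_script_py optimize_script_py optimize_script_py_alt
  exact congrArg _ (congrArg _ ((pvLoops m _ _ le_rfl []).1))
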